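-- pv_equiv track=rewrite | github.com/sundar91/dsa | Hashing/count-triangle.py | solve
-- ===== SOURCE A (Python) =====
-- def solve(A, B):
--     n = len(A)
--     ha = {}
--     hb = {}
--
--     mod = pow(10, 9) + 7
--
--     for i in range(n):
--         val = A[i]
--         ha[val] = 1 + ha.get(val, 0)
--
--         y = B[i]
--         hb[y] = 1 + hb.get(y, 0)
--
--     count = 0
--     for i in range(n):
--         x = A[i]
--         y = B[i]
--         count += ((ha[x] - 1) * (hb[y] - 1)) % mod
--
--     return count % mod
-- ===== SOURCE B (Python) =====
-- def cnt(s, v):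
--     # occurrences of v in the sorted list s, via two binary searches
--     lo, hi = 0, len(s)
--     while lo < hi:
--         mid = (lo + hi) // 2
--         if s[mid] < v:
--             lo = mid + 1
--         else:
--             hi = mid
--     left = lo
--     lo, hi = 0, len(s)
--     while lo < hi:
--         mid = (lo + hi) // 2
--         if s[mid] <= v:
--             lo = mid + 1
--         else:
--             hi = mid
--     return lo - left
--
--
-- def solve(A, B):
--     mod = 10 ** 9 + 7
--     n = len(A)
--     Bp = B[:n]
--     sa = sorted(A)
--     sb = sorted(Bp)
--     total = 0
--     for x, y in zip(A, Bp):
--         total += ((cnt(sa, x) - 1) * (cnt(sb, y) - 1)) % mod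
--     return total % mod
-- ===== Notes on version B (the rewrite author's own statement) =====
-- stated objective: alternative
-- what changed: Replaces A's hash-map frequency counting with a sort-then-binary-search algorithm: A and B[:n] are sorted once and each element's multiplicity is recovered as the difference of two hand-written binary searches (bisect_right - bisect_left) on the sorted copies, so no dictionary is ever built.
import Mathlib
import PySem

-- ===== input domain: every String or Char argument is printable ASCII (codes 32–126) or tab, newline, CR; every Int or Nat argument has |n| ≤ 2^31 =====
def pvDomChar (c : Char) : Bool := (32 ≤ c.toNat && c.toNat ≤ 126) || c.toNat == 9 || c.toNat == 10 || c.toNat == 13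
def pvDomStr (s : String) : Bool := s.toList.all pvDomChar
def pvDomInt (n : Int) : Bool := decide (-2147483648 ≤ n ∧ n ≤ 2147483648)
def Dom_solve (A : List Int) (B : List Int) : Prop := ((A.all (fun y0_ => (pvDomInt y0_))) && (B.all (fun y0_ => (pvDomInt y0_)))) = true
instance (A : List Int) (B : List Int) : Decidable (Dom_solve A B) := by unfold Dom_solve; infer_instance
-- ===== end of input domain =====

-- B replaces A's hash-map frequency counting by sorting A and B[:n] once and
-- recovering each element's multiplicity as the difference of two hand-written
-- binary searches on the sorted copies (objective: alternative algorithm).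

-- ===== PORT A =====
def solve (A : List Int) (B : List Int) : Int :=
  let n : Int := PySem.List.len A
  let md : Int := 10 ^ 9 + 7
  let hs :=
    (PySem.List.pyRange 0 n).foldl
      (fun (s : PySem.Dict Int Int × PySem.Dict Int Int) i =>
        (let val := PySem.List.pyGetD A i 0
         s.1.insert val (1 + s.1.getD val 0),
         let y := PySem.List.pyGetD B i 0
         s.2.insert y (1 + s.2.getD y 0)))
      (PySem.Dict.empty, PySem.Dict.empty)
  let count :=
    (PySem.List.pyRange 0 n).foldl
      (fun c i =>
        let x := PySem.List.pyGetD A i 0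
        let y := PySem.List.pyGetD B i 0
        c + PySem.Int.mod ((hs.1.getD x 0 - 1) * (hs.2.getD y 0 - 1)) md)
      0
  PySem.Int.mod count md

-- ===== PORT B =====
-- Source B's first while-loop (bisect_left). The loop is ported as fuel recursion
-- with fuel = len(s): each iteration strictly shrinks hi - lo, and hi - lo
-- starts at len(s), so the fuel is never exhausted; s[mid] is exact because
-- 0 ≤ mid < len(s) holds whenever the branch is taken (lo < hi ≤ len(s)).
def bsLo (s : List Int) (v : Int) : Nat → Nat → Nat → Nat
  | 0, lo, _ => lo
  | fuel + 1, lo, hi =>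
    if lo < hi then
      match s[(lo + hi) / 2]? with
      | some y => if y < v then bsLo s v fuel ((lo + hi) / 2 + 1) hi
                  else bsLo s v fuel lo ((lo + hi) / 2)
      | none => lo
    else lo

-- Source B's second while-loop (bisect_right), same porting scheme.
def bsHi (s : List Int) (v : Int) : Nat → Nat → Nat → Nat
  | 0, lo, _ => lo
  | fuel + 1, lo, hi =>
    if lo < hi then
      match s[(lo + hi) / 2]? with
      | some y => if y ≤ v then bsHi s v fuel ((lo + hi) / 2 + 1) hi
                  else bsHi s v fuel lo ((lo + hi) / 2)
      | none => lo
    else lo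

-- Source B's cnt: occurrences of v in the sorted list s
def cntS (s : List Int) (v : Int) : Int :=
  let left := bsLo s v s.length 0 s.length
  let right := bsHi s v s.length 0 s.length
  (right : Int) - (left : Int)

def solve_alt (A : List Int) (B : List Int) : Int :=
  let md : Int := 10 ^ 9 + 7
  let n : Int := PySem.List.len A
  let Bp := PySem.List.slice B none (some n)
  let sa := PySem.List.sorted A (fun x => x) false
  let sb := PySem.List.sorted Bp (fun x => x) false
  let total :=
    (A.zip Bp).foldl
      (fun c p => c + PySem.Int.mod ((cntS sa p.1 - 1) * (cntS sb p.2 - 1)) md)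
      0
  PySem.Int.mod total md

-- ===== PRECONDITION & SPEC =====
-- Pre_ excludes exactly the inputs with len(B) < len(A), on which A raises IndexError at B[i].
def Pre_solve (A : List Int) (B : List Int) : Prop := A.length ≤ B.length
instance (A : List Int) (B : List Int) : Decidable (Pre_solve A B) := by unfold Pre_solve; infer_instance
def pvWitness_solve : List Int × List Int := ([1, 2, 1], [2, 2, 3])

def Spec_solve (A : List Int) (B : List Int) (out : Int) : Prop := out = solve_alt A B
instance (A : List Int) (B : List Int) (out : Int) : Decidable (Spec_solve A B out) := by unfold Spec_solve; infer_instance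

-- ===== CLAIM (what is proved, stated in full; the proofs are below) =====
def Claim_equal_solve : Prop := ∀ (A : List Int) (B : List Int), Dom_solve A B → Pre_solve A B → Spec_solve A B (solve A B)

-- ===== LEMMAS AND PROOFS =====

-- the hand-ported loops are PySem's bisect loops
theorem bsLo_eq_bisectLeftLoop (s : List Int) (v : Int) :
    ∀ fuel lo hi, bsLo s v fuel lo hi = PySem.List.bisectLeftLoop s v fuel lo hi := by
  intro fuel
  induction fuel with
  | zero => intro lo hi; rfl
  | succ f ih =>
    intro lo hi
    simp only [bsLo, PySem.List.bisectLeftLoop]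
    split_ifs with h
    · cases hm : s[(lo + hi) / 2]? with
      | none => rfl
      | some y => by_cases hy : y < v <;> simp [hy, ih]
    · rfl

theorem bsHi_eq_bisectRightLoop (s : List Int) (v : Int) :
    ∀ fuel lo hi, bsHi s v fuel lo hi = PySem.List.bisectRightLoop s v fuel lo hi := by
  intro fuel
  induction fuel with
  | zero => intro lo hi; rfl
  | succ f ih =>
    intro lo hi
    simp only [bsHi, PySem.List.bisectRightLoop]
    split_ifs with h
    · cases hm : s[(lo + hi) / 2]? with
      | none => rfl
      | some y =>
        by_cases hy : y ≤ v
        · simp [hy, not_lt.mpr hy, ih]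
        · simp [hy, not_le.mp hy, ih]
    · rfl

-- on a sorted list, cnt is the multiplicity
theorem cntS_eq_count (s : List Int) (v : Int) (hs : s.Pairwise (· ≤ ·)) :
    cntS s v = (s.count v : Int) := by
  obtain ⟨hL1, hL2, hL3⟩ := PySem.List.bisectLeft_spec s v hs
  obtain ⟨hR1, hR2, hR3⟩ := PySem.List.bisectRight_spec s v hs
  set L := PySem.List.bisectLeft s v with hLdef
  set R := PySem.List.bisectRight s v with hRdef
  have hLR : L ≤ R := by
    by_contra hc
    push Not at hc
    have hRlen : R < s.length := lt_of_lt_of_le hc hL1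
    exact absurd (hL2 R hRlen hc) (not_lt.mpr (le_of_lt (hR3 R hRlen le_rfl)))
  have hsplit : s = s.take L ++ ((s.drop L).take (R - L) ++ s.drop R) := by
    have h1 : (s.drop L).take (R - L) ++ (s.drop L).drop (R - L) = s.drop L := List.take_append_drop _ _
    rw [List.drop_drop] at h1
    have : L + (R - L) = R := by omega
    rw [this] at h1
    rw [h1, List.take_append_drop]
  have hcount : s.count v = (s.take L).count v + (((s.drop L).take (R - L)).count v + (s.drop R).count v) := by
    conv_lhs => rw [hsplit]
    simp [List.count_append]
  have c1 : (s.take L).count v = 0 := by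
    rw [List.count_eq_zero]
    intro hv
    obtain ⟨i, hi, hgi⟩ := List.getElem_of_mem hv
    have hilen : i < s.length := lt_of_lt_of_le (by simpa using hi : i < min L s.length) (min_le_right _ _)
    have hiL : i < L := lt_of_lt_of_le (by simpa using hi) (min_le_left _ _)
    rw [List.getElem_take] at hgi
    exact absurd (hL2 i hilen hiL) (by rw [hgi]; exact lt_irrefl v)
  have c3 : (s.drop R).count v = 0 := by
    rw [List.count_eq_zero]
    intro hv
    obtain ⟨i, hi, hgi⟩ := List.getElem_of_mem hv
    have hi' : i < s.length - R := by simpa using hi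
    have hilen : R + i < s.length := by omega
    rw [List.getElem_drop] at hgi
    have := hR3 (R + i) hilen (Nat.le_add_right _ _)
    rw [hgi] at this
    exact lt_irrefl v this
  have c2 : ((s.drop L).take (R - L)).count v = R - L := by
    have hlen : ((s.drop L).take (R - L)).length = R - L := by
      simp [List.length_take, List.length_drop]
      omega
    have hall : ∀ b ∈ (s.drop L).take (R - L), v = b := by
      intro b hb
      obtain ⟨i, hi, hgi⟩ := List.getElem_of_mem hb
      rw [hlen] at hi
      have hlt : L + i < R := by omega
      have hilen : L + i < s.length := lt_of_lt_of_le hlt hR1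
      rw [List.getElem_take, List.getElem_drop] at hgi
      have h1 : v ≤ s[L + i] := hL3 (L + i) hilen (Nat.le_add_right _ _)
      have h2 : s[L + i] ≤ v := hR2 (L + i) hilen hlt
      rw [hgi] at h1 h2
      omega
    have hc := List.count_eq_length.mpr hall
    rw [hlen] at hc
    exact hc
  have hfin : s.count v = R - L := by omega
  unfold cntS
  dsimp only
  rw [show bsLo s v s.length 0 s.length = PySem.List.bisectLeft s v from
      bsLo_eq_bisectLeftLoop s v s.length 0 s.length,
    show bsHi s v s.length 0 s.length = PySem.List.bisectRight s v from
      bsHi_eq_bisectRightLoop s v s.length 0 s.length,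
    ← hLdef, ← hRdef, hfin]
  omega

-- (range n).map (getD ·) reads off the prefix
theorem map_getD_range {α : Type} (xs : List α) (d : α) (n : Nat) (h : n ≤ xs.length) :
    (List.range n).map (fun k => xs.getD k d) = xs.take n := by
  apply List.ext_getElem
  · simp [Nat.min_eq_left h]
  · intro i h1 h2
    simp at h1
    simp [List.getD_eq_getElem?_getD, List.getElem?_eq_getElem (by omega : i < xs.length)]

theorem map_getD_pair_range (A B : List Int) (h : A.length ≤ B.length) :
    (List.range A.length).map (fun k => (A.getD k 0, B.getD k 0)) = A.zip B := by
  apply List.ext_getElem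
  · simp [Nat.min_eq_left h]
  · intro i h1 h2
    simp at h1
    simp [List.getD_eq_getElem?_getD, List.getElem?_eq_getElem (by omega : i < A.length),
      List.getElem?_eq_getElem (by omega : i < B.length), List.getElem_zip]

-- A's result as a sum over the zipped pairs of the per-occurrence modded term
theorem solve_eq (A B : List Int) (h : A.length ≤ B.length) :
    solve A B = PySem.Int.mod
      (((A.zip B).map (fun p =>
        PySem.Int.mod ((((A.count p.1 : Nat) : Int) - 1) * ((((B.take A.length).count p.2 : Nat) : Int) - 1)) (10 ^ 9 + 7))).sum)
      (10 ^ 9 + 7) := by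
  unfold solve
  dsimp only
  rw [show PySem.List.len A = ((A.length : Nat) : Int) from rfl]
  rw [PySem.List.pyRange_zero_natCast, List.foldl_map, List.foldl_map]
  simp only [PySem.List.pyGetD_natCast]
  rw [PySem.List.foldl_prod_mk
      (f := fun d (i : Nat) => PySem.Dict.insert d (A.getD i 0) (1 + PySem.Dict.getD d (A.getD i 0) 0))
      (g := fun d (i : Nat) => PySem.Dict.insert d (B.getD i 0) (1 + PySem.Dict.getD d (B.getD i 0) 0))]
  rw [← List.foldl_map (f := fun i : Nat => A.getD i 0)
      (g := fun d x => PySem.Dict.insert d x (1 + PySem.Dict.getD d x 0))]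
  rw [← List.foldl_map (f := fun i : Nat => B.getD i 0)
      (g := fun d x => PySem.Dict.insert d x (1 + PySem.Dict.getD d x 0))]
  rw [map_getD_range A 0 A.length (le_refl _), map_getD_range B 0 A.length h, List.take_length]
  have flip : ∀ xs : List Int,
      xs.foldl (fun d x => PySem.Dict.insert d x (1 + PySem.Dict.getD d x 0)) PySem.Dict.empty
        = PySem.Dict.counter xs := by
    intro xs
    rw [← PySem.Dict.foldl_insert_getD_add_one_eq_counter]
    exact PySem.List.foldl_congr_mem _ _ _ _ (fun d x _ => by rw [Int.add_comm])
  rw [flip A, flip (B.take A.length)]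
  rw [PySem.List.foldl_add, Int.zero_add]
  congr 1
  rw [show (fun i : Nat => PySem.Int.mod
        (((PySem.Dict.counter A).getD (A.getD i 0) 0 - 1) * ((PySem.Dict.counter (B.take A.length)).getD (B.getD i 0) 0 - 1))
        (10 ^ 9 + 7))
      = (fun p : Int × Int => PySem.Int.mod
        (((PySem.Dict.counter A).getD p.1 0 - 1) * ((PySem.Dict.counter (B.take A.length)).getD p.2 0 - 1))
        (10 ^ 9 + 7)) ∘ (fun i : Nat => (A.getD i 0, B.getD i 0)) from rfl]
  rw [← List.map_map, map_getD_pair_range A B h]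
  refine congrArg List.sum (List.map_congr_left ?_)
  intro p _
  simp [PySem.Dict.getD_counter]

-- B's result as the same sum: cnt on the sorted copy is the multiplicity in it,
-- which is the multiplicity in the original list
theorem solve_alt_eq (A B : List Int) :
    solve_alt A B = PySem.Int.mod
      (((A.zip (B.take A.length)).map (fun p =>
        PySem.Int.mod ((((A.count p.1 : Nat) : Int) - 1) * ((((B.take A.length).count p.2 : Nat) : Int) - 1)) (10 ^ 9 + 7))).sum)
      (10 ^ 9 + 7) := by
  unfold solve_alt
  dsimp only
  rw [show PySem.List.len A = ((A.length : Nat) : Int) from rfl]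
  rw [PySem.List.slice_to_natCast]
  rw [PySem.List.foldl_add, Int.zero_add]
  congr 1
  refine congrArg List.sum (List.map_congr_left ?_)
  intro p _
  have hA : cntS (PySem.List.sorted A (fun x => x) false) p.1 = ((A.count p.1 : Nat) : Int) := by
    rw [cntS_eq_count _ _ (PySem.List.sorted_pairwise A (fun x => x)),
      (PySem.List.sorted_perm A (fun x => x) false).count_eq]
  have hB : cntS (PySem.List.sorted (B.take A.length) (fun x => x) false) p.2
      = (((B.take A.length).count p.2 : Nat) : Int) := by
    rw [cntS_eq_count _ _ (PySem.List.sorted_pairwise (B.take A.length) (fun x => x)),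
      (PySem.List.sorted_perm (B.take A.length) (fun x => x) false).count_eq]
  rw [hA, hB]

-- ===== VERDICT (by name: the statement is the Claim_ definition above) =====
theorem solve_spec : Claim_equal_solve := by
  intro A B _ hPre
  unfold Spec_solve
  rw [solve_eq A B hPre, solve_alt_eq A B]
  have hz : A.zip (B.take A.length) = A.zip B := by
    apply List.ext_getElem
    · simp [Nat.min_eq_left hPre]
    · intro i h1 h2
      simp at h1
      simp [List.getElem_zip, List.getElem_take]
  rw [hz]
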